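-- pv_equiv track=rewrite | github.com/takatakao893/algorithm | basic/exhaustive_search/abc106b.py | solve
-- ===== SOURCE A (Python) =====
-- def solve(n):
--     cnt=0
--     for i in range(1,n+1):
--         if n%i==0:
--             cnt+=1
--     if cnt==8 and n%2==1:
--         return True
--     return False
-- ===== SOURCE B (Python) =====
-- def solve(n):
--     if n < 1 or n % 2 == 0:
--         return False
--     cnt = 0
--     i = 1
--     while i * i <= n:
--         if n % i == 0:
--             cnt += 1 if i * i == n else 2
--         i += 1
--     return cnt == 8
-- ===== Notes on version B (the rewrite author's own statement) =====
-- stated objective: faster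
-- what changed: Counts divisors by trial division only up to sqrt(n) (pairing each divisor d with n/d) and exits immediately on even or non-positive n, instead of scanning all i in 1..n.
import Mathlib
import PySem

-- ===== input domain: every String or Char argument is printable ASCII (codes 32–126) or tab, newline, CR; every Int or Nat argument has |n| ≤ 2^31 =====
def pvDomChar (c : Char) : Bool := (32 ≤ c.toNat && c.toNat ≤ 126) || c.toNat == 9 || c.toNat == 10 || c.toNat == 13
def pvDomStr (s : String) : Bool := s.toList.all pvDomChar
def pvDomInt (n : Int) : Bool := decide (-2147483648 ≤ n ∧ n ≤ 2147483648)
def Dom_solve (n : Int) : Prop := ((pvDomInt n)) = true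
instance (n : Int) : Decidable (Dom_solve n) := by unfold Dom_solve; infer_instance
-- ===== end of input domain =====

-- B is faster: it counts divisors by trial division only up to sqrt(n), pairing d with n/d,
-- and returns early on even or non-positive n; A scans all of 1..n.

-- ===== PORT A =====
def solve (n : Int) : Bool :=
  let cnt : Int :=
    (PySem.List.pyRange 1 (n + 1) 1).foldl
      (fun c i => if PySem.Int.mod n i == 0 then c + 1 else c) 0
  if cnt == 8 && PySem.Int.mod n 2 == 1 then true else false

-- ===== PORT B =====
-- the while loop: i runs while i*i ≤ n, adding 1 for a square-root divisor, 2 otherwise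
def bLoop (n i cnt : Int) : Int :=
  if h : i * i ≤ n then
    bLoop n (i + 1)
      (if PySem.Int.mod n i == 0 then (if i * i == n then cnt + 1 else cnt + 2) else cnt)
  else cnt
termination_by (n + 1 - i).toNat
decreasing_by
  have hin : i ≤ n := by
    by_cases h0 : i ≤ 0
    · nlinarith
    · nlinarith [show (1:Int) ≤ i by omega]
  omega

def solve_alt (n : Int) : Bool :=
  if n < 1 || PySem.Int.mod n 2 == 0 then false
  else bLoop n 1 0 == 8

-- ===== PRECONDITION & SPEC =====
def Spec_solve (n : Int) (out : Bool) : Prop := out = solve_alt n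
instance (n : Int) (out : Bool) : Decidable (Spec_solve n out) := by unfold Spec_solve; infer_instance

-- ===== CLAIM (what is proved, stated in full; the proofs are below) =====
def Claim_equal_solve : Prop := ∀ (n : Int), Dom_solve n → Spec_solve n (solve n)

-- ===== LEMMAS AND PROOFS =====

-- weight contributed by a candidate j ≤ sqrt m in B's loop
def wNat (m j : Nat) : Nat := if j ∣ m then (if j * j = m then 1 else 2) else 0

-- B's loop computes cnt + Σ_{j = i.toNat}^{sqrt m} wNat m j  (for 1 ≤ i)
lemma bLoop_sum (m : Nat) :
    ∀ k (i cnt : Int), 1 ≤ i → Nat.sqrt m + 1 - i.toNat = k →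
      bLoop (m : Int) i cnt = cnt + ∑ j ∈ Finset.Ico i.toNat (Nat.sqrt m + 1), (wNat m j : Int) := by
  intro k
  induction k with
  | zero =>
    intro i cnt hi hk
    have hgt : ¬ i * i ≤ (m : Int) := by
      intro hle
      have : i.toNat ≤ Nat.sqrt m := by
        rw [Nat.le_sqrt]
        have : ((i.toNat * i.toNat : Nat) : Int) ≤ (m : Int) := by
          push_cast
          rw [Int.toNat_of_nonneg (by omega)]
          exact hle
        exact_mod_cast this
      omega
    rw [bLoop, dif_neg hgt]
    rw [Finset.Ico_eq_empty (by omega), Finset.sum_empty, add_zero]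
  | succ k ih =>
    intro i cnt hi hk
    by_cases hle : i * i ≤ (m : Int)
    · have hsq : i.toNat ≤ Nat.sqrt m := by
        rw [Nat.le_sqrt]
        have : ((i.toNat * i.toNat : Nat) : Int) ≤ (m : Int) := by
          push_cast
          rw [Int.toNat_of_nonneg (by omega)]
          exact hle
        exact_mod_cast this
      rw [bLoop, dif_pos hle]
      rw [ih (i + 1) _ (by omega) (by omega)]
      rw [Finset.sum_eq_sum_Ico_succ_bot (by omega : i.toNat < Nat.sqrt m + 1)]
      have hit : ((i + 1).toNat) = i.toNat + 1 := by omega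
      rw [hit]
      have hicast : ((i.toNat : Nat) : Int) = i := by omega
      have hdvd : (PySem.Int.mod (m : Int) i == 0) = (decide (i.toNat ∣ m)) := by
        rcases Decidable.em (i.toNat ∣ m) with hd | hd
        · have : (i : Int) ∣ (m : Int) := by
            rw [← hicast]; exact_mod_cast hd
          simp [PySem.Int.mod_eq_zero_iff_dvd, this, hd]
        · have : ¬ (i : Int) ∣ (m : Int) := by
            rw [← hicast]
            intro hc
            exact hd (by exact_mod_cast hc)
          simp [PySem.Int.mod_eq_zero_iff_dvd, this, hd]
      have hsqeq : (i * i == (m : Int)) = (decide (i.toNat * i.toNat = m)) := by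
        rcases Decidable.em (i.toNat * i.toNat = m) with hd | hd
        · have : i * i = (m : Int) := by
            rw [← hicast]; exact_mod_cast hd
          simp [this, hd]
        · have : ¬ i * i = (m : Int) := by
            rw [← hicast]
            intro hc
            exact hd (by exact_mod_cast hc)
          simp [this, hd]
      rw [hdvd, hsqeq]
      unfold wNat
      by_cases hd : i.toNat ∣ m
      · by_cases hsqm : i.toNat * i.toNat = m
        · simp [hd, hsqm]; ring
        · simp [hd, hsqm]; ring
      · simp [hd]
    · have : i.toNat > Nat.sqrt m := by
        by_contra hc
        apply hle
        have h2 : i.toNat * i.toNat ≤ m := Nat.le_sqrt.mp (by omega)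
        have : ((i.toNat * i.toNat : Nat) : Int) ≤ (m : Int) := by exact_mod_cast h2
        push_cast at this
        rw [Int.toNat_of_nonneg (by omega)] at this
        exact this
      rw [bLoop, dif_neg hle]
      rw [Finset.Ico_eq_empty (by omega), Finset.sum_empty, add_zero]

-- divisor pairing: the number of divisors of m in [1,m] is Σ_{j=1}^{sqrt m} wNat m j
lemma pairing (m : Nat) (hm : 1 ≤ m) :
    (∑ j ∈ Finset.Ico 1 (m + 1), (if j ∣ m then 1 else 0 : Nat)) =
      ∑ j ∈ Finset.Ico 1 (Nat.sqrt m + 1), wNat m j := by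
  have hsmall_eq :
      ((Finset.Ico 1 (m+1)).filter (fun d => d ∣ m)).filter (fun d => d * d ≤ m)
        = (Finset.Ico 1 (Nat.sqrt m + 1)).filter (fun d => d ∣ m) := by
    ext d
    simp only [Finset.mem_filter, Finset.mem_Ico]
    constructor
    · rintro ⟨⟨⟨h1, h2⟩, hd⟩, hsq⟩
      exact ⟨⟨h1, by have := Nat.le_sqrt.mpr hsq; omega⟩, hd⟩
    · rintro ⟨⟨h1, h2⟩, hd⟩
      have hss : d * d ≤ m := Nat.le_sqrt.mp (by omega)
      have hdm : d ≤ m := Nat.le_of_dvd (by omega) hd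
      exact ⟨⟨⟨h1, by omega⟩, hd⟩, hss⟩
  have hlarge :
      (((Finset.Ico 1 (m+1)).filter (fun d => d ∣ m)).filter (fun d => ¬ d * d ≤ m)).card
        = (((Finset.Ico 1 (Nat.sqrt m + 1)).filter (fun d => d ∣ m)).filter
            (fun e => ¬ e * e = m)).card := by
    apply Finset.card_nbij' (fun d => m / d) (fun e => m / e)
    · intro d hdmem
      simp only [Finset.coe_filter, Set.mem_setOf_eq, Finset.mem_filter, Finset.mem_Ico] at hdmem ⊢
      obtain ⟨⟨⟨h1, h2⟩, hd⟩, hsq⟩ := hdmem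
      have hde : (m / d) * d = m := Nat.div_mul_cancel hd
      have hlt : m / d < d := by nlinarith
      have hee : (m / d) * (m / d) < m := by nlinarith [Nat.one_le_div_iff (show 0 < d by omega) |>.mpr (Nat.le_of_dvd (by omega) hd)]
      refine ⟨⟨⟨?_, ?_⟩, ?_⟩, by omega⟩
      · exact (Nat.one_le_div_iff (by omega)).mpr (Nat.le_of_dvd (by omega) hd)
      · have : m / d ≤ Nat.sqrt m := Nat.le_sqrt.mpr (by omega)
        omega
      · exact ⟨d, hde.symm⟩
    · intro e hemem
      simp only [Finset.coe_filter, Set.mem_setOf_eq, Finset.mem_filter, Finset.mem_Ico] at hemem ⊢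
      obtain ⟨⟨⟨h1, h2⟩, hd⟩, hne⟩ := hemem
      have hee : e * e ≤ m := Nat.le_sqrt.mp (by omega)
      have heel : e * e < m := by omega
      have hde : (m / e) * e = m := Nat.div_mul_cancel hd
      have hlt : e < m / e := by nlinarith
      have hdd : m < (m / e) * (m / e) := by nlinarith
      refine ⟨⟨⟨by omega, ?_⟩, ⟨e, hde.symm⟩⟩, by omega⟩
      · have : m / e ≤ m := Nat.div_le_self m e
        omega
    · intro d hdmem
      simp only [Finset.coe_filter, Set.mem_setOf_eq, Finset.mem_filter, Finset.mem_Ico] at hdmem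
      exact Nat.div_div_self hdmem.1.2 (by omega)
    · intro e hemem
      simp only [Finset.coe_filter, Set.mem_setOf_eq, Finset.mem_filter, Finset.mem_Ico] at hemem
      exact Nat.div_div_self hemem.1.2 (by omega)
  -- LHS is the number of divisors of m in [1, m]
  rw [← Finset.card_filter]
  rw [← Finset.card_filter_add_card_filter_not
        (s := (Finset.Ico 1 (m+1)).filter (fun d => d ∣ m)) (p := fun d => d * d ≤ m)]
  -- RHS: sum over divisors up to sqrt m
  have hrw : ∀ j, wNat m j = if j ∣ m then (if j * j = m then 1 else 2) else 0 := fun j => rfl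
  simp only [hrw]
  rw [← Finset.sum_filter]
  have hterm : ∀ j ∈ (Finset.Ico 1 (Nat.sqrt m + 1)).filter (fun d => d ∣ m),
      (if j * j = m then 1 else 2) = 1 + (if ¬ j * j = m then 1 else 0 : Nat) := by
    intro j _
    by_cases h : j * j = m <;> simp [h]
  rw [Finset.sum_congr rfl hterm, Finset.sum_add_distrib, Finset.sum_const, smul_eq_mul, mul_one]
  rw [← Finset.card_filter]
  rw [hsmall_eq, hlarge]

-- A's count equals the divisor count
lemma countA_eq (m : Nat) (hm : 1 ≤ m) :
    ((PySem.List.pyRange 1 ((m : Int) + 1) 1).foldl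
      (fun c i => if PySem.Int.mod (m : Int) i == 0 then c + 1 else c) 0)
      = ((∑ j ∈ Finset.Ico 1 (m + 1), (if j ∣ m then 1 else 0 : Nat) : Nat) : Int) := by
  rw [PySem.List.foldl_if_add_one, zero_add]
  rw [PySem.List.pyRange_one]
  have hlen : (((m : Int) + 1) - 1).toNat = m := by omega
  rw [hlen, List.countP_map]
  have hc : ∀ M : Nat, List.countP (fun k : Nat => PySem.Int.mod (m : Int) (1 + (k : Int)) == 0) (List.range M)
      = ∑ k ∈ Finset.range M, (if (k + 1) ∣ m then 1 else 0 : Nat) := by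
    intro M
    induction M with
    | zero => simp
    | succ M ih =>
      rw [List.range_succ, List.countP_append, Finset.sum_range_succ, ih]
      have hterm : (List.countP (fun k : Nat => PySem.Int.mod (m : Int) (1 + (k : Int)) == 0) [M])
          = (if (M + 1) ∣ m then 1 else 0 : Nat) := by
        have hiff : (PySem.Int.mod (m : Int) (1 + (M : Int)) == 0) = decide ((M + 1) ∣ m) := by
          rcases Decidable.em ((M + 1) ∣ m) with hd | hd
          · have : (1 + (M : Int)) ∣ (m : Int) := by
              rw [add_comm]; exact_mod_cast hd
            simp [PySem.Int.mod_eq_zero_iff_dvd, this, hd]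
          · have : ¬ (1 + (M : Int)) ∣ (m : Int) := by
              rw [add_comm]
              intro hc
              exact hd (by exact_mod_cast hc)
            simp [PySem.Int.mod_eq_zero_iff_dvd, this, hd]
        rcases Decidable.em ((M + 1) ∣ m) with hd | hd <;>
          simp [hiff, hd]
      rw [hterm]
  have hcomp : ((fun i => PySem.Int.mod (m : Int) i == 0) ∘ fun k : Nat => 1 + (k : Int))
      = (fun k : Nat => PySem.Int.mod (m : Int) (1 + (k : Int)) == 0) := rfl
  rw [hcomp, hc m]
  rw [Finset.sum_Ico_eq_sum_range]
  have hmm : m + 1 - 1 = m := rfl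
  rw [hmm]
  congr 1
  apply Finset.sum_congr rfl
  intro k _
  rw [add_comm]

-- ===== VERDICT (by name: the statement is the Claim_ definition above) =====
theorem solve_spec : Claim_equal_solve := by
  unfold Claim_equal_solve
  intro n _
  unfold Spec_solve
  by_cases h1 : n < 1
  · have hnil : PySem.List.pyRange 1 (n + 1) 1 = [] := PySem.List.pyRange_one_eq_nil (by omega)
    simp [solve, solve_alt, hnil, h1]
  · have hm1 : 1 ≤ n.toNat := by omega
    have hn : ((n.toNat : Nat) : Int) = n := by omega
    have hmod2 : PySem.Int.mod n 2 = n % 2 := PySem.Int.mod_eq_emod_of_pos (by omega)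
    have key : (PySem.List.pyRange 1 (n + 1) 1).foldl
        (fun c i => if PySem.Int.mod n i == 0 then c + 1 else c) 0 = bLoop n 1 0 := by
      rw [← hn]
      rw [countA_eq n.toNat hm1, pairing n.toNat hm1]
      rw [bLoop_sum n.toNat (Nat.sqrt n.toNat) 1 0 (by omega) (by simp), zero_add]
      push_cast
      rfl
    rcases Int.emod_two_eq n with h2 | h2
    · simp only [solve, solve_alt, key, hmod2, h2]
      simp [h1]
    · simp only [solve, solve_alt, key, hmod2, h2]
      simp only [h1, decide_false, Bool.false_or]
      rcases Decidable.em (bLoop n 1 0 = 8) with h8 | h8 <;> simp [h8]
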